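-- pv_equiv track=rewrite | github.com/Kumamoto-Hamachi/atcoder_pr | abc_contest/abc201/c/c.py | count
-- ===== SOURCE A (Python) =====
-- def count(sure, unknown):
--     if len(sure) + len(unknown) == 0:
--         ans = 0
--     elif len(sure) > 4:
--         ans = 0
--     elif len(unknown) == 10:
--         ans = 10000
--     else:
--         all_list = []
--         candidates = sure + unknown
--         candidate_num = len(candidates)
--         true_num = candidate_num
--         candidate_num = 4 if candidate_num < 4 else candidate_num
--         for i in range(candidate_num-3):
--             i = i % true_num
--             for j in range(i+1, candidate_num-2):
--                 j = j % true_num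
--                 for k in range(j+1, candidate_num-1):
--                     k = k % true_num
--                     for l in range(k+1, candidate_num):
--                         l = l % true_num
--                         cadidate_l = [candidates[i], candidates[j], candidates[k], candidates[l]]
--                         all_list += add(cadidate_l)
--         clear_l = check(sure, all_list)
--         ans = len(clear_l)
--     return ans
--
-- def add(cadidate_l):
--     tmp_l = [None] * (4 ** 4)
--     order = 0
--     for i in range(4):
--         for j in range(4):
--             for k in range(4):
--                 for l in range(4):
--                     tmp_l[order] = [cadidate_l[i], cadidate_l[j], cadidate_l[k], cadidate_l[l]]
--                     order += 1
--     return tmp_l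
--
-- def check(sure, all_list):
--     clear_l = []
--     for c_l in all_list:
--         flag = True
--         for s in sure:
--             if s not in c_l:
--                 flag = False
--         if flag:
--             if c_l not in clear_l:
--                 clear_l.append(c_l)
--     return clear_l
-- ===== SOURCE B (Python) =====
-- def count(sure, unknown):
--     # Same top-level shortcuts as the task: nothing to choose from, impossible demand,
--     # or all ten digits unknown.
--     if len(sure) + len(unknown) == 0 or len(sure) > 4:
--         return 0
--     if len(unknown) == 10:
--         return 10000
--     # Distinct candidate values (first-occurrence order) and distinct required values.
--     values = []
--     for x in sure + unknown:
--         if x not in values: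
--             values.append(x)
--     need = []
--     for s in sure:
--         if s not in need:
--             need.append(s)
--     # Count 4-tuples over the distinct values in which every required value appears.
--     total = 0
--     for a in values:
--         for b in values:
--             for c in values:
--                 for d in values:
--                     if all(s == a or s == b or s == c or s == d for s in need):
--                         total += 1
--     return total
-- ===== Notes on version B (the rewrite author's own statement) =====
-- stated objective: alternative
-- what changed: Keeps A's three top-level shortcut branches but replaces its core enumeration of index combinations, 256-fold tuple expansion per combination and quadratic list-based dedup by a single direct count over 4-tuples of the distinct candidate values, testing that every sure value appears.
import Mathlib
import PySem

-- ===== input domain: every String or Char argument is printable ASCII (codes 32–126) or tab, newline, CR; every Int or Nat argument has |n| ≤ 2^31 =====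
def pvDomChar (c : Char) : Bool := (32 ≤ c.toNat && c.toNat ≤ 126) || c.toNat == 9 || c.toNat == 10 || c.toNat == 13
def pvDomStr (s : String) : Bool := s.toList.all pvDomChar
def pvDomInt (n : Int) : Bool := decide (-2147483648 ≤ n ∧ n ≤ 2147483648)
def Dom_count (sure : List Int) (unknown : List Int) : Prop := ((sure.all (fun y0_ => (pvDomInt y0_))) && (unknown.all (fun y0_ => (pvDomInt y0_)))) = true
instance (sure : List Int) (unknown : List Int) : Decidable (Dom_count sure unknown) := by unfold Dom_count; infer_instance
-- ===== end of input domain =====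

-- B keeps A's top-level shortcut branches but counts the qualifying 4-tuples over the
-- distinct candidate values directly, instead of A's combination/expansion/dedup enumeration.


-- ===== PORT A =====
-- helper add(cadidate_l): the Python writes tmp_l[order] = [...] into a pre-allocated list
-- with order = 0,1,2,… in loop order, i.e. it appends the 256 quadruples in loop order;
-- ported as nested folds appending in that same order.
def pyAdd (c : List Int) : List (List Int) :=
  (PySem.List.pyRange 0 4 1).foldl (fun acc i =>
    (PySem.List.pyRange 0 4 1).foldl (fun acc j =>
      (PySem.List.pyRange 0 4 1).foldl (fun acc k =>
        (PySem.List.pyRange 0 4 1).foldl (fun acc l =>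
          acc ++ [[PySem.List.pyGetD c i 0, PySem.List.pyGetD c j 0,
                   PySem.List.pyGetD c k 0, PySem.List.pyGetD c l 0]]) acc) acc) acc) []

-- helper check(sure, all_list)
def pyCheck (sure : List Int) (all_list : List (List Int)) : List (List Int) :=
  all_list.foldl (fun clear_l c_l =>
    let flag := sure.foldl (fun f s => if s ∈ c_l then f else false) true
    if flag then (if c_l ∈ clear_l then clear_l else clear_l ++ [c_l]) else clear_l) []

-- count: every index fed to pyGetD is i % true_num with 0 < true_num, hence in range
-- (pyGetD is exact there).
def count (sure : List Int) (unknown : List Int) : Int :=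
  if sure.length + unknown.length = 0 then 0
  else if 4 < sure.length then 0
  else if unknown.length = 10 then 10000
  else
    let candidates := sure ++ unknown
    let true_num : Int := (candidates.length : Int)
    let candidate_num : Int :=
      if (candidates.length : Int) < 4 then 4 else (candidates.length : Int)
    let all_list : List (List Int) :=
      (PySem.List.pyRange 0 (candidate_num - 3) 1).foldl (fun acc i0 =>
        let i := PySem.Int.mod i0 true_num
        (PySem.List.pyRange (i + 1) (candidate_num - 2) 1).foldl (fun acc j0 =>
          let j := PySem.Int.mod j0 true_num
          (PySem.List.pyRange (j + 1) (candidate_num - 1) 1).foldl (fun acc k0 =>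
            let k := PySem.Int.mod k0 true_num
            (PySem.List.pyRange (k + 1) candidate_num 1).foldl (fun acc l0 =>
              let l := PySem.Int.mod l0 true_num
              acc ++ pyAdd [PySem.List.pyGetD candidates i 0, PySem.List.pyGetD candidates j 0,
                            PySem.List.pyGetD candidates k 0, PySem.List.pyGetD candidates l 0]) acc) acc) acc) []
    ((pyCheck sure all_list).length : Int)

-- ===== PORT B =====
def count_alt (sure : List Int) (unknown : List Int) : Int :=
  if sure.length + unknown.length = 0 ∨ 4 < sure.length then 0
  else if unknown.length = 10 then 10000
  else
  let values : PySem.Set Int := PySem.Set.ofList (sure ++ unknown)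
  let need : PySem.Set Int := PySem.Set.ofList sure
  values.foldl (fun t a =>
    values.foldl (fun t b =>
      values.foldl (fun t c =>
        values.foldl (fun t d =>
          if need.all (fun s => s == a || s == b || s == c || s == d) then t + 1 else t)
          t) t) t) 0

-- ===== PRECONDITION & SPEC =====
def Spec_count (sure : List Int) (unknown : List Int) (out : Int) : Prop :=
  out = count_alt sure unknown
instance (sure : List Int) (unknown : List Int) (out : Int) : Decidable (Spec_count sure unknown out) := by
  unfold Spec_count; infer_instance

-- ===== CLAIM (what is proved, stated in full; the proofs are below) =====
def Claim_equal_count : Prop := ∀ (sure : List Int) (unknown : List Int), Dom_count sure unknown → Spec_count sure unknown (count sure unknown)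

-- ===== LEMMAS AND PROOFS =====

-- "every element of sure occurs in t"
def pvP (sure : List Int) (t : List Int) : Bool := sure.all (fun s => decide (s ∈ t))

-- all 4-tuples over a list of values
def pvTuples (V : List Int) : List (List Int) :=
  V.flatMap fun a => V.flatMap fun b => V.flatMap fun c => V.flatMap fun d => [[a, b, c, d]]

theorem mem_pvTuples {V : List Int} {t : List Int} :
    t ∈ pvTuples V ↔ ∃ a ∈ V, ∃ b ∈ V, ∃ c ∈ V, ∃ d ∈ V, t = [a, b, c, d] := by
  simp [pvTuples]

theorem flag_eq (sure t : List Int) (f : Bool) :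
    sure.foldl (fun f s => if s ∈ t then f else false) f = (f && pvP sure t) := by
  induction sure generalizing f with
  | nil => simp [pvP]
  | cons s rest ih =>
    simp only [List.foldl_cons, pvP, List.all_cons]
    rw [ih]
    by_cases h : s ∈ t <;> simp [h, pvP]

theorem pyCheck_mem_aux (sure : List Int) (L : List (List Int)) (acc : List (List Int)) (t : List Int) :
    t ∈ L.foldl (fun clear_l c_l =>
      let flag := sure.foldl (fun f s => if s ∈ c_l then f else false) true
      if flag then (if c_l ∈ clear_l then clear_l else clear_l ++ [c_l]) else clear_l) acc ↔
    t ∈ acc ∨ (t ∈ L ∧ pvP sure t = true) := by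
  induction L generalizing acc with
  | nil => simp
  | cons c rest ih =>
    rw [List.foldl_cons, ih]
    simp only [flag_eq, Bool.true_and]
    by_cases hp : pvP sure c = true <;> by_cases hm : c ∈ acc <;>
      simp [hp, hm, List.mem_append, List.mem_cons] <;> aesop

theorem pyCheck_nodup_aux (sure : List Int) (L : List (List Int)) (acc : List (List Int))
    (h : acc.Nodup) :
    (L.foldl (fun clear_l c_l =>
      let flag := sure.foldl (fun f s => if s ∈ c_l then f else false) true
      if flag then (if c_l ∈ clear_l then clear_l else clear_l ++ [c_l]) else clear_l) acc).Nodup := by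
  induction L generalizing acc with
  | nil => simpa
  | cons c rest ih =>
    rw [List.foldl_cons]
    apply ih
    simp only [flag_eq, Bool.true_and]
    by_cases hp : pvP sure c = true <;> by_cases hm : c ∈ acc <;>
      simp [hp, hm, List.nodup_append, h]
    intro a ha hac
    exact hm (hac ▸ ha)

theorem countP_flatMap {α β : Type} (l : List α) (f : α → List β) (p : β → Bool) :
    (l.flatMap f).countP p = (l.map fun a => (f a).countP p).sum := by
  induction l with
  | nil => simp
  | cons a rest ih => simp [List.countP_append, ih]

theorem cond_eq (sure : List Int) (a b c d : Int) :
    (PySem.Set.ofList sure).all (fun s => s == a || s == b || s == c || s == d)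
      = pvP sure [a, b, c, d] := by
  rw [Bool.eq_iff_iff]
  simp only [List.all_eq_true, pvP, PySem.Set.mem_ofList, List.mem_cons, decide_eq_true_eq,
    beq_iff_eq, Bool.or_eq_true, List.not_mem_nil, or_false, or_assoc]

theorem cast_sum_map {α : Type} (l : List α) (f : α → Nat) :
    (((l.map f).sum : Nat) : Int) = (l.map fun x => ((f x : Nat) : Int)).sum := by
  induction l with
  | nil => simp
  | cons a rest ih => simp [ih]

theorem sum_map_congr {α : Type} (l : List α) (f g : α → Int)
    (h : ∀ a ∈ l, f a = g a) : (l.map f).sum = (l.map g).sum := by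
  rw [List.map_congr_left h]

theorem cast_countP {α : Type} (l : List α) (p : α → Bool) :
    ((l.countP p : Nat) : Int) = (l.map fun x => if p x then (1 : Int) else 0).sum := by
  induction l with
  | nil => simp
  | cons a rest ih => by_cases h : p a <;> simp [h, ih, add_comm]


theorem count_alt_eq_filter (sure unknown : List Int)
    (hs : ¬ (sure.length + unknown.length = 0 ∨ 4 < sure.length))
    (hu : ¬ unknown.length = 10) :
    count_alt sure unknown =
      (((pvTuples (PySem.Set.ofList (sure ++ unknown))).filter (pvP sure)).length : Int) := by
  unfold count_alt
  rw [if_neg hs, if_neg hu]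
  simp only [PySem.List.foldl_if_add_one, PySem.List.foldl_add, zero_add]
  rw [← List.countP_eq_length_filter]
  unfold pvTuples
  simp only [countP_flatMap]
  rw [cast_sum_map]
  apply sum_map_congr _ _ _; intro a _
  rw [cast_sum_map]
  apply sum_map_congr _ _ _; intro b _
  rw [cast_sum_map]
  apply sum_map_congr _ _ _; intro c _
  rw [cast_sum_map]
  rw [cast_countP]
  apply sum_map_congr _ _ _; intro d _
  simp [cond_eq, List.countP_cons]

theorem nodup1 (V : List Int) (h : V.Nodup) (a b c : Int) :
    (V.flatMap fun d => [[a, b, c, d]]).Nodup := by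
  rw [List.nodup_flatMap]
  refine ⟨fun _ _ => List.nodup_singleton _, h.imp ?_⟩
  intro d d' hne
  simp only [Function.onFun, List.disjoint_singleton, List.mem_singleton]
  intro he
  simp only [List.cons.injEq, true_and, and_true] at he
  exact hne he.symm

theorem nodup2 (V : List Int) (h : V.Nodup) (a b : Int) :
    (V.flatMap fun c => V.flatMap fun d => [[a, b, c, d]]).Nodup := by
  rw [List.nodup_flatMap]
  refine ⟨fun c _ => nodup1 V h a b c, h.imp ?_⟩
  intro c c' hne t ht ht'
  simp only [List.mem_flatMap, List.mem_singleton] at ht ht'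
  obtain ⟨d, _, rfl⟩ := ht
  obtain ⟨d', _, he⟩ := ht'
  simp only [List.cons.injEq, true_and, and_true] at he
  exact hne he.1

theorem nodup3 (V : List Int) (h : V.Nodup) (a : Int) :
    (V.flatMap fun b => V.flatMap fun c => V.flatMap fun d => [[a, b, c, d]]).Nodup := by
  rw [List.nodup_flatMap]
  refine ⟨fun b _ => nodup2 V h a b, h.imp ?_⟩
  intro b b' hne t ht ht'
  simp only [List.mem_flatMap, List.mem_singleton] at ht ht'
  obtain ⟨c, _, d, _, rfl⟩ := ht
  obtain ⟨c', _, d', _, he⟩ := ht'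
  simp only [List.cons.injEq, true_and, and_true] at he
  exact hne he.1

theorem pvTuples_nodup {V : List Int} (h : V.Nodup) : (pvTuples V).Nodup := by
  unfold pvTuples
  rw [List.nodup_flatMap]
  refine ⟨fun a _ => nodup3 V h a, h.imp ?_⟩
  intro a a' hne t ht ht'
  simp only [List.mem_flatMap, List.mem_singleton] at ht ht'
  obtain ⟨b, _, c, _, d, _, rfl⟩ := ht
  obtain ⟨b', _, c', _, d', _, he⟩ := ht'
  simp only [List.cons.injEq, and_true] at he
  exact hne he.1

theorem mem_pyAdd {c : List Int} {t : List Int} :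
    t ∈ pyAdd c ↔ ∃ i ∈ PySem.List.pyRange 0 4 1, ∃ j ∈ PySem.List.pyRange 0 4 1,
      ∃ k ∈ PySem.List.pyRange 0 4 1, ∃ l ∈ PySem.List.pyRange 0 4 1,
        t = [PySem.List.pyGetD c i 0, PySem.List.pyGetD c j 0,
             PySem.List.pyGetD c k 0, PySem.List.pyGetD c l 0] := by
  unfold pyAdd
  simp only [PySem.List.foldl_append_singleton_eq_map, PySem.List.foldl_append_eq_flatMap,
    List.nil_append, List.mem_flatMap, List.mem_map]
  constructor
  · rintro ⟨i, hi, j, hj, k, hk, l, hl, ht⟩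
    exact ⟨i, hi, j, hj, k, hk, l, hl, ht.symm⟩
  · rintro ⟨i, hi, j, hj, k, hk, l, hl, ht⟩
    exact ⟨i, hi, j, hj, k, hk, l, hl, ht.symm⟩

theorem getD_four_iff {w x y z a : Int} :
    (∃ i ∈ PySem.List.pyRange 0 4 1, PySem.List.pyGetD [w, x, y, z] i 0 = a) ↔
      a ∈ [w, x, y, z] := by
  rw [show PySem.List.pyRange 0 4 1 = [0, 1, 2, 3] from by decide]
  constructor
  · rintro ⟨i, hi, hg⟩
    fin_cases hi <;> simp_all [PySem.List.pyGetD]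
  · intro ha
    rcases List.mem_cons.1 ha with h | ha
    · exact ⟨0, by decide, by simp [PySem.List.pyGetD, h.symm]⟩
    rcases List.mem_cons.1 ha with h | ha
    · exact ⟨1, by decide, by simp [PySem.List.pyGetD, h.symm]⟩
    rcases List.mem_cons.1 ha with h | ha
    · exact ⟨2, by decide, by simp [PySem.List.pyGetD, h.symm]⟩
    rcases List.mem_cons.1 ha with h | ha
    · exact ⟨3, by decide, by simp [PySem.List.pyGetD, h.symm]⟩
    · simp at ha

theorem mem_pyAdd_four {w x y z : Int} {t : List Int} :
    t ∈ pyAdd [w, x, y, z] ↔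
      ∃ a ∈ [w, x, y, z], ∃ b ∈ [w, x, y, z], ∃ c ∈ [w, x, y, z], ∃ d ∈ [w, x, y, z],
        t = [a, b, c, d] := by
  rw [mem_pyAdd]
  constructor
  · rintro ⟨i, hi, j, hj, k, hk, l, hl, ht⟩
    exact ⟨_, getD_four_iff.1 ⟨i, hi, rfl⟩, _, getD_four_iff.1 ⟨j, hj, rfl⟩,
      _, getD_four_iff.1 ⟨k, hk, rfl⟩, _, getD_four_iff.1 ⟨l, hl, rfl⟩, ht⟩
  · rintro ⟨a, ha, b, hb, c, hc, d, hd, ht⟩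
    obtain ⟨i, hi, hia⟩ := getD_four_iff.2 ha
    obtain ⟨j, hj, hjb⟩ := getD_four_iff.2 hb
    obtain ⟨k, hk, hkc⟩ := getD_four_iff.2 hc
    obtain ⟨l, hl, hld⟩ := getD_four_iff.2 hd
    exact ⟨i, hi, j, hj, k, hk, l, hl, by rw [ht, hia, hjb, hkc, hld]⟩

-- i % n = i for indices already in range

theorem mod_id {x n : Int} (h0 : 0 ≤ x) (h : x < n) : PySem.Int.mod x n = x := by
  rw [PySem.Int.mod_eq_emod_of_pos (by omega)]
  exact Int.emod_eq_of_lt h0 h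

theorem getD_mod_mem {C : List Int} (h1 : C ≠ []) (x : Int) :
    PySem.List.pyGetD C (PySem.Int.mod x (C.length : Int)) 0 ∈ C := by
  have hl : 0 < (C.length : Int) := by
    have := List.length_pos_iff.2 h1; omega
  have h0 := PySem.Int.mod_nonneg x hl
  have h2 := PySem.Int.mod_lt x hl
  rw [PySem.List.pyGetD_of_nonneg C 0 h0]
  have hlt : (PySem.Int.mod x (C.length : Int)).toNat < C.length := by omega
  rw [List.getD_eq_getElem _ _ hlt]
  exact List.getElem_mem hlt

theorem mem_AL (C : List Int) (h1 : C ≠ []) (t : List Int) :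
    (t ∈ (PySem.List.pyRange 0 ((if ((C.length : Int)) < 4 then 4 else (C.length : Int)) - 3) 1).foldl
        (fun acc i0 =>
          let i := PySem.Int.mod i0 (C.length : Int)
          (PySem.List.pyRange (i + 1) ((if ((C.length : Int)) < 4 then 4 else (C.length : Int)) - 2) 1).foldl
            (fun acc j0 =>
              let j := PySem.Int.mod j0 (C.length : Int)
              (PySem.List.pyRange (j + 1) ((if ((C.length : Int)) < 4 then 4 else (C.length : Int)) - 1) 1).foldl
                (fun acc k0 =>
                  let k := PySem.Int.mod k0 (C.length : Int)
                  (PySem.List.pyRange (k + 1) (if ((C.length : Int)) < 4 then 4 else (C.length : Int)) 1).foldl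
                    (fun acc l0 =>
                      let l := PySem.Int.mod l0 (C.length : Int)
                      acc ++ pyAdd [PySem.List.pyGetD C i 0, PySem.List.pyGetD C j 0,
                                    PySem.List.pyGetD C k 0, PySem.List.pyGetD C l 0]) acc) acc) acc) [])
      ↔ ∃ a ∈ C, ∃ b ∈ C, ∃ c ∈ C, ∃ d ∈ C, t = [a, b, c, d] := by
  have hl : 0 < (C.length : Int) := by
    have := List.length_pos_iff.2 h1; omega
  simp only [PySem.List.foldl_append_eq_flatMap, List.nil_append, List.mem_flatMap]
  constructor
  · rintro ⟨i0, hi0, j0, hj0, k0, hk0, l0, hl0, ht⟩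
    rw [mem_pyAdd_four] at ht
    obtain ⟨a, ha, b, hb, c, hc, d, hd, rfl⟩ := ht
    have hmem : ∀ e : Int, e ∈ [PySem.List.pyGetD C (PySem.Int.mod i0 (C.length : Int)) 0,
        PySem.List.pyGetD C (PySem.Int.mod j0 (C.length : Int)) 0,
        PySem.List.pyGetD C (PySem.Int.mod k0 (C.length : Int)) 0,
        PySem.List.pyGetD C (PySem.Int.mod l0 (C.length : Int)) 0] → e ∈ C := by
      intro e he
      fin_cases he <;> exact getD_mod_mem h1 _
    exact ⟨a, hmem a ha, b, hmem b hb, c, hmem c hc, d, hmem d hd, rfl⟩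
  · rintro ⟨a, ha, b, hb, c, hc, d, hd, rfl⟩
    obtain ⟨ia, hia, haeq⟩ := List.mem_iff_getElem.1 ha
    obtain ⟨ib, hib, hbeq⟩ := List.mem_iff_getElem.1 hb
    obtain ⟨ic, hic, hceq⟩ := List.mem_iff_getElem.1 hc
    obtain ⟨id, hid, hdeq⟩ := List.mem_iff_getElem.1 hd
    by_cases h4 : 4 ≤ C.length
    · -- big case
      have hcn : (if ((C.length : Int)) < 4 then 4 else (C.length : Int)) = (C.length : Int) := by
        rw [if_neg]; omega
      rw [hcn]
      have hsub : ({ia, ib, ic, id} : Finset ℕ) ⊆ Finset.range C.length := by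
        intro x hx
        simp only [Finset.mem_insert, Finset.mem_singleton] at hx
        rcases hx with rfl | rfl | rfl | rfl <;> simpa [Finset.mem_range]
      have hcard : ({ia, ib, ic, id} : Finset ℕ).card ≤ 4 := by
        apply le_trans (Finset.card_insert_le _ _)
        have := Finset.card_insert_le ib ({ic, id} : Finset ℕ)
        have := Finset.card_insert_le ic ({id} : Finset ℕ)
        simp_all [Finset.card_singleton]; omega
      obtain ⟨u, hsu, hur, hu4⟩ :=
        Finset.exists_subsuperset_card_eq hsub hcard (by rw [Finset.card_range]; exact h4)
      have hlen : (u.sort (· ≤ ·)).length = 4 := by rw [Finset.length_sort]; exact hu4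
      obtain ⟨i, j, k, m, hL⟩ := List.length_eq_four.mp hlen
      have hpw : (u.sort (· ≤ ·)).Pairwise (· < ·) :=
        ((Finset.pairwise_sort u (· ≤ ·)).and (Finset.sort_nodup u (· ≤ ·))).imp
          (fun {a b} h => lt_of_le_of_ne h.1 h.2)
      rw [hL] at hpw
      simp only [List.pairwise_cons, List.mem_cons, List.not_mem_nil] at hpw
      have hij : i < j := by simp_all
      have hjk : j < k := by simp_all
      have hkm : k < m := by simp_all
      have humem : ∀ x ∈ u, x < C.length := by
        intro x hx; simpa [Finset.mem_range] using hur hx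
      have hm_lt : m < C.length := humem m (by rw [← Finset.mem_sort (· ≤ ·), hL]; simp)
      have hk_lt : k < C.length := by omega
      have hj_lt : j < C.length := by omega
      have hi_lt : i < C.length := by omega
      -- each original index equals one of i,j,k,m
      have hin : ∀ x ∈ ({ia, ib, ic, id} : Finset ℕ), x = i ∨ x = j ∨ x = k ∨ x = m := by
        intro x hx
        have := hsu hx
        rw [← Finset.mem_sort (· ≤ ·), hL] at this
        simpa using this
      -- the quadruple entry list contains every C[x] for x among i,j,k,m
      have hentry : ∀ (e : Int) (x : ℕ) (hx : x < C.length), C[x] = e →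
          (x = i ∨ x = j ∨ x = k ∨ x = m) →
          e ∈ [PySem.List.pyGetD C (PySem.Int.mod (i : Int) (C.length : Int)) 0,
               PySem.List.pyGetD C (PySem.Int.mod (j : Int) (C.length : Int)) 0,
               PySem.List.pyGetD C (PySem.Int.mod (k : Int) (C.length : Int)) 0,
               PySem.List.pyGetD C (PySem.Int.mod (m : Int) (C.length : Int)) 0] := by
        intro e x hx he hcases
        rw [mod_id (by positivity) (by exact_mod_cast hi_lt),
            mod_id (by positivity) (by exact_mod_cast hj_lt),
            mod_id (by positivity) (by exact_mod_cast hk_lt),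
            mod_id (by positivity) (by exact_mod_cast hm_lt),
            PySem.List.pyGetD_natCast, PySem.List.pyGetD_natCast,
            PySem.List.pyGetD_natCast, PySem.List.pyGetD_natCast]
        rcases hcases with rfl | rfl | rfl | rfl
        · simp [← he, List.getElem?_eq_getElem hx]
        · simp [← he, List.getElem?_eq_getElem hx]
        · simp [← he, List.getElem?_eq_getElem hx]
        · simp [← he, List.getElem?_eq_getElem hx]
      refine ⟨(i : Int), ?_, (j : Int), ?_, (k : Int), ?_, (m : Int), ?_, ?_⟩
      · rw [PySem.List.mem_pyRange_one]; omega
      · rw [mod_id (by positivity) (by exact_mod_cast hi_lt), PySem.List.mem_pyRange_one]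
        omega
      · rw [mod_id (by positivity) (by exact_mod_cast hj_lt), PySem.List.mem_pyRange_one]
        omega
      · rw [mod_id (by positivity) (by exact_mod_cast hk_lt), PySem.List.mem_pyRange_one]
        omega
      · rw [mem_pyAdd_four]
        exact ⟨a, hentry a ia hia haeq (hin ia (by simp)),
               b, hentry b ib hib hbeq (hin ib (by simp)),
               c, hentry c ic hic hceq (hin ic (by simp)),
               d, hentry d id hid hdeq (hin id (by simp)), rfl⟩
    · -- small case: C.length ∈ {1,2,3}
      have hn : C.length = 1 ∨ C.length = 2 ∨ C.length = 3 := by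
        have := List.length_pos_iff.2 h1; omega
      rcases hn with hn | hn | hn
      · obtain ⟨p, hC⟩ := List.length_eq_one_iff.mp hn
        subst hC
        simp only [List.mem_singleton] at ha hb hc hd
        have e1 : PySem.Int.mod 0 1 = 0 := by decide
        have e2 : PySem.Int.mod 1 1 = 0 := by decide
        refine ⟨0, by norm_num [PySem.List.mem_pyRange_one, e1, e2],
                1, by norm_num [PySem.List.mem_pyRange_one, e1, e2],
                1, by norm_num [PySem.List.mem_pyRange_one, e1, e2],
                1, by norm_num [PySem.List.mem_pyRange_one, e1, e2], ?_⟩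
        rw [mem_pyAdd_four]
        refine ⟨a, ?_, b, ?_, c, ?_, d, ?_, rfl⟩ <;>
          norm_num [e1, e2, PySem.List.pyGetD_ofNat', ha, hb, hc, hd]
      · obtain ⟨p, q, hC⟩ := List.length_eq_two.mp hn
        subst hC
        simp only [List.mem_cons, List.not_mem_nil, or_false] at ha hb hc hd
        have e1 : PySem.Int.mod 0 2 = 0 := by decide
        have e2 : PySem.Int.mod 1 2 = 1 := by decide
        have e3 : PySem.Int.mod 2 2 = 0 := by decide
        refine ⟨0, by norm_num [PySem.List.mem_pyRange_one, e1, e2, e3],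
                1, by norm_num [PySem.List.mem_pyRange_one, e1, e2, e3],
                2, by norm_num [PySem.List.mem_pyRange_one, e1, e2, e3],
                1, by norm_num [PySem.List.mem_pyRange_one, e1, e2, e3], ?_⟩
        rw [mem_pyAdd_four]
        refine ⟨a, ?_, b, ?_, c, ?_, d, ?_, rfl⟩
        · rcases ha with rfl | rfl <;> norm_num [e1, e2, e3, PySem.List.pyGetD_ofNat']
        · rcases hb with rfl | rfl <;> norm_num [e1, e2, e3, PySem.List.pyGetD_ofNat']
        · rcases hc with rfl | rfl <;> norm_num [e1, e2, e3, PySem.List.pyGetD_ofNat']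
        · rcases hd with rfl | rfl <;> norm_num [e1, e2, e3, PySem.List.pyGetD_ofNat']
      · obtain ⟨p, q, r, hC⟩ := List.length_eq_three.mp hn
        subst hC
        simp only [List.mem_cons, List.not_mem_nil, or_false] at ha hb hc hd
        have e1 : PySem.Int.mod 0 3 = 0 := by decide
        have e2 : PySem.Int.mod 1 3 = 1 := by decide
        have e3 : PySem.Int.mod 2 3 = 2 := by decide
        have e4 : PySem.Int.mod 3 3 = 0 := by decide
        refine ⟨0, by norm_num [PySem.List.mem_pyRange_one, e1, e2, e3, e4],
                1, by norm_num [PySem.List.mem_pyRange_one, e1, e2, e3, e4],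
                2, by norm_num [PySem.List.mem_pyRange_one, e1, e2, e3, e4],
                3, by norm_num [PySem.List.mem_pyRange_one, e1, e2, e3, e4], ?_⟩
        rw [mem_pyAdd_four]
        refine ⟨a, ?_, b, ?_, c, ?_, d, ?_, rfl⟩
        · rcases ha with rfl | rfl | rfl <;> norm_num [e1, e2, e3, e4, PySem.List.pyGetD_ofNat']
        · rcases hb with rfl | rfl | rfl <;> norm_num [e1, e2, e3, e4, PySem.List.pyGetD_ofNat']
        · rcases hc with rfl | rfl | rfl <;> norm_num [e1, e2, e3, e4, PySem.List.pyGetD_ofNat']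
        · rcases hd with rfl | rfl | rfl <;> norm_num [e1, e2, e3, e4, PySem.List.pyGetD_ofNat']

theorem pyCheck_mem (sure : List Int) (L : List (List Int)) (t : List Int) :
    t ∈ pyCheck sure L ↔ t ∈ L ∧ pvP sure t = true := by
  unfold pyCheck
  rw [pyCheck_mem_aux]
  simp

theorem pyCheck_nodup (sure : List Int) (L : List (List Int)) : (pyCheck sure L).Nodup := by
  unfold pyCheck
  exact pyCheck_nodup_aux sure L [] List.nodup_nil


theorem nodup_len_eq (l1 l2 : List (List Int)) (h1 : l1.Nodup) (h2 : l2.Nodup)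
    (h : ∀ t, t ∈ l1 ↔ t ∈ l2) : l1.length = l2.length := by
  rw [← List.toFinset_card_of_nodup h1, ← List.toFinset_card_of_nodup h2]
  congr 1
  ext t
  simp [h]

-- ===== VERDICT (by name: the statement is the Claim_ definition above) =====
theorem count_spec : Claim_equal_count := by
  intro sure unknown _
  unfold Spec_count count
  by_cases h0 : sure.length + unknown.length = 0
  · rw [if_pos h0]
    unfold count_alt
    rw [if_pos (Or.inl h0)]
  · rw [if_neg h0]
    by_cases hs4 : 4 < sure.length
    · rw [if_pos hs4]
      unfold count_alt
      rw [if_pos (Or.inr hs4)]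
    · rw [if_neg hs4]
      by_cases hu10 : unknown.length = 10
      · rw [if_pos hu10]
        unfold count_alt
        rw [if_neg (by push_neg; exact ⟨h0, by omega⟩), if_pos hu10]
      · rw [if_neg hu10]
        rw [count_alt_eq_filter sure unknown (by push_neg; exact ⟨h0, by omega⟩) hu10]
        have hne : sure ++ unknown ≠ [] := by
          intro h
          apply h0
          have := congrArg List.length h
          simpa using this
        refine congrArg Nat.cast (nodup_len_eq _ _ (pyCheck_nodup _ _)
          ((pvTuples_nodup (PySem.Set.nodup_ofList _)).filter _) ?_)
        intro t
        rw [pyCheck_mem, mem_AL (sure ++ unknown) hne, List.mem_filter, mem_pvTuples]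
        constructor
        · rintro ⟨⟨a, ha, b, hb, c, hc, d, hd, rfl⟩, hp⟩
          exact ⟨⟨a, (PySem.Set.mem_ofList _ _).2 ha, b, (PySem.Set.mem_ofList _ _).2 hb,
                 c, (PySem.Set.mem_ofList _ _).2 hc, d, (PySem.Set.mem_ofList _ _).2 hd, rfl⟩, hp⟩
        · rintro ⟨⟨a, ha, b, hb, c, hc, d, hd, rfl⟩, hp⟩
          exact ⟨⟨a, (PySem.Set.mem_ofList _ _).1 ha, b, (PySem.Set.mem_ofList _ _).1 hb,
                 c, (PySem.Set.mem_ofList _ _).1 hc, d, (PySem.Set.mem_ofList _ _).1 hd, rfl⟩, hp⟩
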